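-- pv_equiv track=rewrite | github.com/Michaelhuazhang/code_offer | 左传云算法刷题/高频算法刷题/七/problem6.py | maxMad
-- ===== SOURCE A (Python) =====
-- def maxMad(array):
-- 	if not array or len(array) < 2:
-- 		return 0
-- 	array.sort()
-- 	res = array[-1] - array[0]
-- 	maxI = len(array) - 2
-- 	minI = 1
-- 	while minI < maxI:
-- 		res += array[maxI + 1] - array[minI] # 最大-次小
-- 		res += array[maxI] - array[minI-1]    # 次大-最小
-- 		minI += 1
-- 		maxI -= 1
-- 	if minI == maxI:
-- 		# 奇数，放在两侧，哪侧最大，选哪侧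
-- 		res += max(array[maxI + 1] - array[minI], array[maxI] - array[minI - 1])
-- 	return res
-- ===== SOURCE B (Python) =====
-- def maxMad(array):
--     if not array or len(array) < 2:
--         return 0
--     array.sort()
--     n = len(array)
--     m = n // 2
--     if n % 2 == 0:
--         return 2 * (sum(array[m:]) - sum(array[:m])) - array[m] + array[m - 1]
--     return (2 * (sum(array[m + 1:]) - sum(array[:m])) - array[m + 1] + array[m - 1]
--             + max(array[m + 1] - array[m], array[m] - array[m - 1]))
-- ===== Notes on version B (the rewrite author's own statement) =====
-- stated objective: alternative
-- what changed: Replaces A's converging two-pointer accumulation loop (after the sort) with a closed-form weighted sum: 2*(sum of the upper half) - 2*(sum of the lower half) with a boundary correction, plus the same median-side max term for odd lengths.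
import Mathlib
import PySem

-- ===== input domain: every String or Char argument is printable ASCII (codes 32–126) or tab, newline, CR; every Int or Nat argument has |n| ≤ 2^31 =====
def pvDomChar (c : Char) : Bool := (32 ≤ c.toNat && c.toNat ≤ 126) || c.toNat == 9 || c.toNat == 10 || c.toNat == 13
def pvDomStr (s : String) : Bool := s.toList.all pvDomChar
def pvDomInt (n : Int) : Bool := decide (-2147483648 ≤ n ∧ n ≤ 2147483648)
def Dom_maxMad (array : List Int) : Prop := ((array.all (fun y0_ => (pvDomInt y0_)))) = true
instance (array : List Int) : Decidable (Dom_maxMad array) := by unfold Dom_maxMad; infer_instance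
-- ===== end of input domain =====

-- B replaces A's converging two-pointer accumulation loop by a closed-form weighted sum
-- (2·(upper-half sum − lower-half sum) with a boundary/median correction); objective: alternative.
-- Both A and B sort the caller's list in place (array.sort()); the equivalence proved here is
-- about the RETURN value (the in-place sort side effect is identical in A and B).

-- ===== PORT A =====
-- array[i]: every index A evaluates is in range on A's executions (1 ≤ minI, maxI ≤ len-2,
-- len ≥ 2), so `(pyGet? …).getD 0` is exact here (the default is never taken).
def pyAt (s : List Int) (i : Int) : Int := (PySem.List.pyGet? s i).getD 0

-- the `while minI < maxI` loop followed by the `if minI == maxI` correction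
def maxMadLoop (s : List Int) (minI maxI res : Int) : Int :=
  if _h : minI < maxI then
    maxMadLoop s (minI + 1) (maxI - 1)
      (res + (pyAt s (maxI + 1) - pyAt s minI) + (pyAt s maxI - pyAt s (minI - 1)))
  else if minI = maxI then
    res + max (pyAt s (maxI + 1) - pyAt s minI) (pyAt s maxI - pyAt s (minI - 1))
  else res
termination_by (maxI - minI).toNat
decreasing_by omega

def maxMad (array : List Int) : Int :=
  if array = [] ∨ array.length < 2 then 0
  else
    let s := PySem.List.sorted array (fun x => x) false
    maxMadLoop s 1 ((s.length : Int) - 2) (pyAt s (-1) - pyAt s 0)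

-- ===== PORT B =====
def maxMad_alt (array : List Int) : Int :=
  if array = [] ∨ array.length < 2 then 0
  else
    let s := PySem.List.sorted array (fun x => x) false
    let n : Int := s.length
    let m : Int := PySem.Int.floordiv n 2
    if PySem.Int.mod n 2 = 0 then
      2 * ((PySem.List.slice s (some m) none).sum - (PySem.List.slice s none (some m)).sum)
        - pyAt s m + pyAt s (m - 1)
    else
      2 * ((PySem.List.slice s (some (m + 1)) none).sum - (PySem.List.slice s none (some m)).sum)
        - pyAt s (m + 1) + pyAt s (m - 1)
        + max (pyAt s (m + 1) - pyAt s m) (pyAt s m - pyAt s (m - 1))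

-- ===== PRECONDITION & SPEC =====
def Spec_maxMad (array : List Int) (out : Int) : Prop := out = maxMad_alt array
instance (array : List Int) (out : Int) : Decidable (Spec_maxMad array out) := by unfold Spec_maxMad; infer_instance

-- ===== CLAIM (what is proved, stated in full; the proofs are below) =====
def Claim_equal_maxMad : Prop := ∀ (array : List Int), Dom_maxMad array → Spec_maxMad array (maxMad array)

-- ===== LEMMAS AND PROOFS =====

-- sum of g over the c consecutive Int indices a, a+1, …, a+c-1
def idxSum (g : Int → Int) (a : Int) : ℕ → Int
  | 0 => 0
  | c + 1 => g a + idxSum g (a + 1) c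

lemma idxSum_succ_end (g : Int → Int) : ∀ (c : ℕ) (a : Int),
    idxSum g a (c + 1) = idxSum g a c + g (a + c) := by
  intro c
  induction c with
  | zero => intro a; simp [idxSum]
  | succ c ih =>
      intro a
      have := ih (a + 1)
      simp [idxSum] at this ⊢
      rw [this]; ring_nf

-- what the loop body adds over k iterations starting at minI = i, maxI = i + 2k+… (even gap)
def loopAddE (g : Int → Int) : ℕ → Int → Int
  | 0, _ => 0
  | k + 1, i => (g (i + 2 * k + 3) - g i) + (g (i + 2 * k + 2) - g (i - 1)) + loopAddE g k (i + 1)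

-- odd gap: maxI = i + 2k + 1; the loop runs k+1 times and the pointers cross
def loopAddO (g : Int → Int) : ℕ → Int → Int
  | 0, i => (g (i + 2) - g i) + (g (i + 1) - g (i - 1))
  | k + 1, i => (g (i + 2 * k + 4) - g i) + (g (i + 2 * k + 3) - g (i - 1)) + loopAddO g k (i + 1)

lemma maxMadLoop_even (s : List Int) : ∀ (k : ℕ) (i res : Int),
    maxMadLoop s i (i + 2 * k) res =
      res + loopAddE (pyAt s) k i +
        max (pyAt s (i + k + 1) - pyAt s (i + k)) (pyAt s (i + k) - pyAt s (i + k - 1)) := by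
  intro k
  induction k with
  | zero =>
      intro i res
      rw [maxMadLoop]
      simp [loopAddE]
  | succ k ih =>
      intro i res
      rw [maxMadLoop, dif_pos (by push_cast; omega : i < i + 2 * ((k : ℕ) + 1 : ℕ))]
      rw [show i + 2 * ((k : ℕ) + 1 : ℕ) - 1 = (i + 1) + 2 * (k : ℕ) from by push_cast; ring]
      rw [ih (i + 1)]
      simp only [loopAddE]
      push_cast
      rw [show i + 2 * ((k : Int) + 1) + 1 = i + 2 * k + 3 from by ring,
          show i + 2 * ((k : Int) + 1) = i + 2 * k + 2 from by ring,
          show i + 1 + (k : Int) + 1 = i + (k + 1) + 1 from by ring,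
          show i + 1 + (k : Int) = i + (k + 1) from by ring]
      ring_nf

lemma maxMadLoop_odd (s : List Int) : ∀ (k : ℕ) (i res : Int),
    maxMadLoop s i (i + 2 * k + 1) res = res + loopAddO (pyAt s) k i := by
  intro k
  induction k with
  | zero =>
      intro i res
      rw [maxMadLoop, dif_pos (by omega : i < i + 2 * ((0 : ℕ) : ℕ) + 1)]
      rw [maxMadLoop]
      simp [loopAddO]
      ring_nf
  | succ k ih =>
      intro i res
      rw [maxMadLoop, dif_pos (by push_cast; omega : i < i + 2 * ((k : ℕ) + 1 : ℕ) + 1)]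
      rw [show i + 2 * ((k : ℕ) + 1 : ℕ) + 1 - 1 = (i + 1) + 2 * (k : ℕ) + 1 from by push_cast; ring]
      rw [ih (i + 1)]
      simp only [loopAddO]
      push_cast
      rw [show i + 2 * ((k : Int) + 1) + 1 + 1 = i + 2 * k + 4 from by ring,
          show i + 2 * ((k : Int) + 1) + 1 = i + 2 * k + 3 from by ring]
      ring_nf

lemma loopAddE_closed (g : Int → Int) : ∀ (k : ℕ) (i : Int),
    loopAddE g k i =
      idxSum g (i + k + 2) k + idxSum g (i + k + 1) k - idxSum g i k - idxSum g (i - 1) k := by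
  intro k
  induction k with
  | zero => intro i; simp [loopAddE, idxSum]
  | succ k ih =>
      intro i
      have hi := ih (i + 1)
      have h1 := idxSum_succ_end g k (i + k + 3)
      have h2 := idxSum_succ_end g k (i + k + 2)
      have f1 : idxSum g i (k + 1) = g i + idxSum g (i + 1) k := rfl
      have f2 : idxSum g (i - 1) (k + 1) = g (i - 1) + idxSum g (i - 1 + 1) k := rfl
      simp only [loopAddE]
      push_cast
      rw [f1, f2, show i - 1 + 1 = i from by ring,
          show i + ((k : Int) + 1) + 2 = i + k + 3 from by ring,
          show i + ((k : Int) + 1) + 1 = i + k + 2 from by ring,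
          h1, h2, hi,
          show i + 1 + (k : Int) + 2 = i + k + 3 from by ring,
          show i + 1 + (k : Int) + 1 = i + k + 2 from by ring,
          show i + 1 - 1 = i from by ring,
          show i + (k : Int) + 3 + k = i + 2 * k + 3 from by ring,
          show i + (k : Int) + 2 + k = i + 2 * k + 2 from by ring]
      ring

lemma loopAddO_closed (g : Int → Int) : ∀ (k : ℕ) (i : Int),
    loopAddO g k i =
      idxSum g (i + k + 2) (k + 1) + idxSum g (i + k + 1) (k + 1)
        - idxSum g i (k + 1) - idxSum g (i - 1) (k + 1) := by
  intro k
  induction k with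
  | zero => intro i; simp [loopAddO, idxSum]; ring
  | succ k ih =>
      intro i
      have hi := ih (i + 1)
      have h1 := idxSum_succ_end g (k + 1) (i + k + 3)
      have h2 := idxSum_succ_end g (k + 1) (i + k + 2)
      have f1 : idxSum g i (k + 2) = g i + idxSum g (i + 1) (k + 1) := rfl
      have f2 : idxSum g (i - 1) (k + 2) = g (i - 1) + idxSum g (i - 1 + 1) (k + 1) := rfl
      push_cast at h1 h2
      simp only [loopAddO]
      push_cast
      rw [f1, f2, show i - 1 + 1 = i from by ring,
          show i + ((k : Int) + 1) + 2 = i + k + 3 from by ring,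
          show i + ((k : Int) + 1) + 1 = i + k + 2 from by ring,
          h1, h2, hi,
          show i + 1 + (k : Int) + 2 = i + k + 3 from by ring,
          show i + 1 + (k : Int) + 1 = i + k + 2 from by ring,
          show i + 1 - 1 = i from by ring,
          show i + (k : Int) + 3 + ((k : Int) + 1) = i + 2 * k + 4 from by ring,
          show i + (k : Int) + 2 + ((k : Int) + 1) = i + 2 * k + 3 from by ring]
      ring

lemma idxSum_eq_sum (s : List Int) : ∀ (c a : ℕ), a + c ≤ s.length →
    idxSum (pyAt s) (a : Int) c = ((s.drop a).take c).sum := by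
  intro c
  induction c with
  | zero => intro a h; simp [idxSum]
  | succ c ih =>
      intro a h
      have ha : a < s.length := by omega
      have hdrop : s.drop a = s[a] :: s.drop (a + 1) := List.drop_eq_getElem_cons ha
      have hg : pyAt s (a : Int) = s[a] := by
        simp [pyAt, PySem.List.pyGet?_natCast, List.getElem?_eq_getElem ha]
      have hcast : ((a : Int) + 1) = ((a + 1 : ℕ) : Int) := by push_cast; ring
      have := ih (a + 1) (by omega)
      simp only [idxSum, hg, hcast, this, hdrop, List.take_succ_cons, List.sum_cons]

lemma maxMad_eq_alt (array : List Int) : maxMad array = maxMad_alt array := by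
  unfold maxMad maxMad_alt
  by_cases hg : array = [] ∨ array.length < 2
  · simp only [if_pos hg]
  · simp only [if_neg hg]
    rw [not_or, not_lt] at hg
    obtain ⟨-, hlen2⟩ := hg
    have hsl : (PySem.List.sorted array (fun x => x) false).length = array.length :=
      PySem.List.length_sorted array _ false
    set s := PySem.List.sorted array (fun x => x) false with hs
    have hn2 : 2 ≤ s.length := by omega
    have hlast : pyAt s (-1) = pyAt s ((s.length - 1 : ℕ) : Int) := by
      unfold pyAt
      rw [PySem.List.pyGet?_neg_one, List.getLast?_eq_getElem?, PySem.List.pyGet?_natCast]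
    have hdropsum : ∀ a : ℕ, a ≤ s.length →
        (s.drop a).sum = idxSum (pyAt s) (a : Int) (s.length - a) := by
      intro a ha
      rw [idxSum_eq_sum s (s.length - a) a (by omega),
          List.take_of_length_le (by simp)]
    have htakesum : ∀ a : ℕ, a ≤ s.length →
        (s.take a).sum = idxSum (pyAt s) 0 a := by
      intro a ha
      have h := idxSum_eq_sum s a 0 (by omega)
      simp only [Nat.cast_zero, List.drop_zero] at h
      exact h.symm
    have hfd : PySem.Int.floordiv (s.length : Int) 2 = ((s.length / 2 : ℕ) : Int) := by
      exact_mod_cast PySem.Int.floordiv_natCast s.length 2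
    have hmod : PySem.Int.mod (s.length : Int) 2 = ((s.length % 2 : ℕ) : Int) := by
      exact_mod_cast PySem.Int.mod_natCast s.length 2
    rcases Nat.even_or_odd s.length with ⟨m, hm⟩ | ⟨m, hm⟩
    · -- even length: n = m + m, m ≥ 1
      have hm1 : 1 ≤ m := by omega
      have hfd' : PySem.Int.floordiv (s.length : Int) 2 = (m : Int) := by
        rw [hfd]; norm_cast; omega
      have hmod' : PySem.Int.mod (s.length : Int) 2 = 0 := by
        rw [hmod]; norm_cast; omega
      rw [hmod', if_pos rfl]
      simp only [hfd', PySem.List.slice_from_natCast, PySem.List.slice_to_natCast, hlast]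
      rw [hdropsum m (by omega), htakesum m (by omega)]
      rcases Nat.lt_or_ge m 2 with hm2 | hm2
      · -- m = 1, length 2
        have hm' : m = 1 := by omega
        subst hm'
        rw [show ((s.length : Int) - 2) = 0 from by omega, maxMadLoop]
        norm_num [idxSum]
        rw [show s.length - 1 = 1 from by omega]
        simp [idxSum]
        ring
      · obtain ⟨j, hj⟩ : ∃ j, m = j + 2 := ⟨m - 2, by omega⟩
        subst hj
        rw [show ((s.length : Int) - 2) = 1 + 2 * (j : Int) + 1 from by push_cast [hm]; ring,
            maxMadLoop_odd s j 1, loopAddO_closed,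
            show (1 : Int) + (j : Int) + 2 = (j : Int) + 3 from by ring,
            show (1 : Int) + (j : Int) + 1 = (j : Int) + 2 from by ring,
            show ((1 : Int) - 1) = 0 from by ring,
            show ((s.length - 1 : ℕ) : Int) = 2 * (j : Int) + 3 from by push_cast [hm]; omega,
            show s.length - (j + 2) = j + 2 from by omega,
            show ((j + 2 : ℕ) : Int) = (j : Int) + 2 from by push_cast; ring,
            show ((j : Int) + 2 - 1) = (j : Int) + 1 from by ring]
        have eA : idxSum (pyAt s) ((j : Int) + 2) (j + 2)
            = pyAt s ((j : Int) + 2) + idxSum (pyAt s) ((j : Int) + 2 + 1) (j + 1) := rfl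
        have eB : idxSum (pyAt s) ((j : Int) + 2) (j + 2)
            = idxSum (pyAt s) ((j : Int) + 2) (j + 1) + pyAt s (2 * (j : Int) + 3) := by
          have h := idxSum_succ_end (pyAt s) (j + 1) ((j : Int) + 2)
          rwa [show ((j : Int) + 2 + ((j + 1 : ℕ) : Int)) = 2 * (j : Int) + 3 from by
            push_cast; ring] at h
        have eC : idxSum (pyAt s) 0 (j + 2)
            = pyAt s 0 + idxSum (pyAt s) 1 (j + 1) := by
          have h : idxSum (pyAt s) 0 (j + 2)
              = pyAt s 0 + idxSum (pyAt s) (0 + 1) (j + 1) := rfl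
          rwa [show ((0 : Int) + 1) = 1 from by ring] at h
        have eD : idxSum (pyAt s) 0 (j + 2)
            = idxSum (pyAt s) 0 (j + 1) + pyAt s ((j : Int) + 1) := by
          have h := idxSum_succ_end (pyAt s) (j + 1) 0
          rwa [show ((0 : Int) + ((j + 1 : ℕ) : Int)) = (j : Int) + 1 from by
            push_cast; ring] at h
        -- 2 * idxSum = front-form + end-form
        have e2A : 2 * idxSum (pyAt s) ((j : Int) + 2) (j + 2)
            = pyAt s ((j : Int) + 2) + idxSum (pyAt s) ((j : Int) + 2 + 1) (j + 1)
              + (idxSum (pyAt s) ((j : Int) + 2) (j + 1) + pyAt s (2 * (j : Int) + 3)) := by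
          rw [two_mul]; nth_rewrite 1 [eA]; rw [eB]
        have e2C : 2 * idxSum (pyAt s) 0 (j + 2)
            = pyAt s 0 + idxSum (pyAt s) 1 (j + 1)
              + (idxSum (pyAt s) 0 (j + 1) + pyAt s ((j : Int) + 1)) := by
          rw [two_mul]; nth_rewrite 1 [eC]; rw [eD]
        rw [mul_sub, e2A, e2C,
            show ((j : Int) + 2 + 1) = (j : Int) + 3 from by ring]
        ring
    · -- odd length: n = 2 * m + 1, m ≥ 1
      have hm1 : 1 ≤ m := by omega
      obtain ⟨j, hj⟩ : ∃ j, m = j + 1 := ⟨m - 1, by omega⟩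
      subst hj
      have hfd' : PySem.Int.floordiv (s.length : Int) 2 = ((j : Int) + 1) := by
        rw [hfd]; norm_cast; omega
      have hmod' : ¬ (PySem.Int.mod (s.length : Int) 2 = 0) := by
        rw [hmod]; norm_cast; omega
      simp only [hfd', if_neg hmod', hlast]
      rw [show (some ((j : Int) + 1) : Option Int) = some (((j + 1 : ℕ) : Int)) from
            congrArg some (by push_cast; ring),
          PySem.List.slice_to_natCast,
          show ((j : Int) + 1 + 1) = ((j + 2 : ℕ) : Int) from by push_cast; ring,
          PySem.List.slice_from_natCast,
          hdropsum (j + 2) (by omega), htakesum (j + 1) (by omega)]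
      rw [show ((s.length : Int) - 2) = 1 + 2 * (j : Int) from by push_cast [hm]; ring,
          maxMadLoop_even s j 1, loopAddE_closed,
          show (1 : Int) + (j : Int) + 2 = (j : Int) + 3 from by ring,
          show (1 : Int) + (j : Int) + 1 = (j : Int) + 2 from by ring,
          show ((1 : Int) - 1) = 0 from by ring,
          show ((s.length - 1 : ℕ) : Int) = 2 * (j : Int) + 2 from by push_cast [hm]; omega,
          show s.length - (j + 2) = j + 1 from by omega,
          show ((j + 2 : ℕ) : Int) = (j : Int) + 2 from by push_cast; ring,
          show (1 : Int) + (j : Int) - 1 = (j : Int) from by ring,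
          show (1 : Int) + (j : Int) = (j : Int) + 1 from by ring,
          show ((j : Int) + 1 - 1) = (j : Int) from by ring]
      have eA : idxSum (pyAt s) ((j : Int) + 2) (j + 1)
          = pyAt s ((j : Int) + 2) + idxSum (pyAt s) ((j : Int) + 2 + 1) j := rfl
      have eB : idxSum (pyAt s) ((j : Int) + 2) (j + 1)
          = idxSum (pyAt s) ((j : Int) + 2) j + pyAt s (2 * (j : Int) + 2) := by
        have h := idxSum_succ_end (pyAt s) j ((j : Int) + 2)
        rwa [show ((j : Int) + 2 + (j : Int)) = 2 * (j : Int) + 2 from by ring] at h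
      have eC : idxSum (pyAt s) 0 (j + 1)
          = pyAt s 0 + idxSum (pyAt s) 1 j := by
        have h : idxSum (pyAt s) 0 (j + 1)
            = pyAt s 0 + idxSum (pyAt s) (0 + 1) j := rfl
        rwa [show ((0 : Int) + 1) = 1 from by ring] at h
      have eD : idxSum (pyAt s) 0 (j + 1)
          = idxSum (pyAt s) 0 j + pyAt s ((j : Int)) := by
        have h := idxSum_succ_end (pyAt s) j 0
        rwa [show ((0 : Int) + (j : Int)) = (j : Int) from by ring] at h
      have e2A : 2 * idxSum (pyAt s) ((j : Int) + 2) (j + 1)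
          = pyAt s ((j : Int) + 2) + idxSum (pyAt s) ((j : Int) + 2 + 1) j
            + (idxSum (pyAt s) ((j : Int) + 2) j + pyAt s (2 * (j : Int) + 2)) := by
        rw [two_mul]; nth_rewrite 1 [eA]; rw [eB]
      have e2C : 2 * idxSum (pyAt s) 0 (j + 1)
          = pyAt s 0 + idxSum (pyAt s) 1 j
            + (idxSum (pyAt s) 0 j + pyAt s ((j : Int))) := by
        rw [two_mul]; nth_rewrite 1 [eC]; rw [eD]
      rw [mul_sub, e2A, e2C,
          show ((j : Int) + 2 + 1) = (j : Int) + 3 from by ring]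
      ring

-- ===== VERDICT (by name: the statement is the Claim_ definition above) =====
theorem maxMad_spec : Claim_equal_maxMad := by
  intro array _
  exact maxMad_eq_alt array
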